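-- pv_equiv track=rewrite | github.com/BadrRibzat/book-generator | backend/books/services/multi_llm_generator.py | _validate_content
-- ===== SOURCE A (Python) =====
-- def _validate_content(content: str) -> bool:
--     """
--     Validate that generated content meets minimum quality standards
--     """
--     if not content or len(content) < 100:
--         return False
--
--     # Check for minimum word count
--     words = content.split()
--     if len(words) < 50:
--         return False
--
--     # Check for paragraph structure
--     paragraphs = [p.strip() for p in content.split('\n') if p.strip()]
--     if len(paragraphs) < 1:
--         return False
--
--     # Ensure no single-line paragraphs dominate
--     short_paragraphs = [p for p in paragraphs if len(p.split()) < 5]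
--     if len(short_paragraphs) > len(paragraphs) * 0.5:
--         return False
--
--     return True
-- ===== SOURCE B (Python) =====
-- def _validate_content(content: str) -> bool:
--     """
--     Validate that generated content meets minimum quality standards
--     """
--     if len(content) < 100:
--         return False
--
--     # Single character-level state machine: no splitting, no intermediate lists.
--     # total = total word count, paras = non-blank lines, short = non-blank lines
--     # with fewer than 5 words; lw = words seen on the current line, in_word =
--     # currently inside a word.
--     total = paras = short = lw = 0
--     in_word = False
--     for ch in content:
--         if ch == '\n':
--             total += lw
--             if lw > 0:
--                 paras += 1
--                 if lw < 5:
--                     short += 1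
--             lw = 0
--             in_word = False
--         elif ch.isspace():
--             in_word = False
--         else:
--             if not in_word:
--                 lw += 1
--             in_word = True
--     total += lw
--     if lw > 0:
--         paras += 1
--         if lw < 5:
--             short += 1
--
--     return total >= 50 and paras >= 1 and short * 2 <= paras
-- ===== Notes on version B (the rewrite author's own statement) =====
-- stated objective: alternative
-- what changed: Replaces A's three list-building passes (whitespace split for words, newline split plus strip for paragraphs, a comprehension for short paragraphs) and early-return chain with a single character-level state machine that counts total words, non-blank lines and short lines in one scan, ending with one combined boolean; the float test short > paras*0.5 becomes the exact integer test short*2 <= paras.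
import Mathlib
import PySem

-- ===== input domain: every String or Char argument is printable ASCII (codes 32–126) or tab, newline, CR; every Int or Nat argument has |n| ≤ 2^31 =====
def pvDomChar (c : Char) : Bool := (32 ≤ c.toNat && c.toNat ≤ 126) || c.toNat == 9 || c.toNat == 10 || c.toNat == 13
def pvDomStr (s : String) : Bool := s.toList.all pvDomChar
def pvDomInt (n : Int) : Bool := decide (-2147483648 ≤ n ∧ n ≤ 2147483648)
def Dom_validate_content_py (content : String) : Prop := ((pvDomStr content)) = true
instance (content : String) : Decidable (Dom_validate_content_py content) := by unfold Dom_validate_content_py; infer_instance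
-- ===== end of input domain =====

-- B replaces A's split()/split('\n')/strip() list-building passes with a single character-level
-- state machine counting total words, non-blank lines and short lines in one scan (objective:
-- alternative); same return value everywhere.

-- ===== PORT A =====
-- Literal port of A. Notes on exactness:
--   * `not content` is content = ""; len(content) counts code points.
--   * `[p.strip() for p in content.split('\n') if p.strip()]` keeps p.strip() exactly when it is
--     non-empty, i.e. map strip then filter non-empty (the tested and the kept value coincide).
--   * `len(short) > len(paragraphs) * 0.5`: n * 0.5 is exactly n/2 as a float, so the comparison
--     is exactly the integer test short * 2 > paragraphs.
def validate_content_py (content : String) : Bool :=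
  if content = "" ∨ content.toList.length < 100 then false
  else
    let words := PySem.Chars.split₀ content.toList
    if words.length < 50 then false
    else
      let paragraphs := ((PySem.Chars.splitOn content.toList ['\n']).map PySem.Chars.strip).filter
        (fun p => !p.isEmpty)
      if paragraphs.length < 1 then false
      else
        let short_paragraphs := paragraphs.filter (fun p => (PySem.Chars.split₀ p).length < 5)
        if short_paragraphs.length * 2 > paragraphs.length then false
        else true

-- ===== PORT B =====
-- Literal port of Source B: a fold over the characters with state (total, paras, short, lw, in_word);
-- pvFlush is the repeated end-of-line block (total += lw; if lw > 0: paras += 1; if lw < 5: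
-- short += 1; reset), run on '\n' and once at the end; `short * 2 <= paras` as in Source B.
def pvFlush (st : Nat × Nat × Nat × Nat × Bool) : Nat × Nat × Nat × Nat × Bool :=
  match st with
  | (t, p, s, lw, _) =>
    (t + lw, if 0 < lw then p + 1 else p,
     if 0 < lw then (if lw < 5 then s + 1 else s) else s, 0, false)

def pvScanStep (st : Nat × Nat × Nat × Nat × Bool) (c : Char) : Nat × Nat × Nat × Nat × Bool :=
  if c == '\n' then pvFlush st
  else if PySem.Chars.isspace c then (st.1, st.2.1, st.2.2.1, st.2.2.2.1, false)
  else (st.1, st.2.1, st.2.2.1,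
        if st.2.2.2.2 then st.2.2.2.1 else st.2.2.2.1 + 1, true)

def validate_content_py_alt (content : String) : Bool :=
  if content.toList.length < 100 then false
  else
    let st := pvFlush (content.toList.foldl pvScanStep (0, 0, 0, 0, false))
    decide (50 ≤ st.1) && (decide (1 ≤ st.2.1) && decide (st.2.2.1 * 2 ≤ st.2.1))

-- ===== PRECONDITION & SPEC =====
def Spec_validate_content_py (content : String) (out : Bool) : Prop := out = validate_content_py_alt content
instance (content : String) (out : Bool) : Decidable (Spec_validate_content_py content out) := by unfold Spec_validate_content_py; infer_instance

-- ===== CLAIM (what is proved, stated in full; the proofs are below) =====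
def Claim_equal_validate_content_py : Prop := ∀ (content : String), Dom_validate_content_py content → Spec_validate_content_py content (validate_content_py content)

-- ===== LEMMAS AND PROOFS =====

-- Reference word counter: pvWcAux l inw = number of words started in l given we are currently
-- inside a word iff inw; pvWc l = len(l.split()).
def pvWcAux : List Char → Bool → Nat
  | [], _ => 0
  | c :: r, inw =>
    if PySem.Chars.isspace c then pvWcAux r false
    else (if inw then 0 else 1) + pvWcAux r true

def pvWc (l : List Char) : Nat := pvWcAux l false

-- Word counts of the lines of cs, the first line continued from a pending count lw / flag inw.
def pvWcl : List Char → Nat → Bool → List Nat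
  | [], lw, _ => [lw]
  | c :: r, lw, inw =>
    if c == '\n' then lw :: pvWcl r 0 false
    else if PySem.Chars.isspace c then pvWcl r lw false
    else pvWcl r (if inw then lw else lw + 1) true

-- Per-line accumulator mirroring pvFlush on the (total, paras, short) part.
def pvLineStep (acc : Nat × Nat × Nat) (w : Nat) : Nat × Nat × Nat :=
  (acc.1 + w, if 0 < w then acc.2.1 + 1 else acc.2.1,
   if 0 < w then (if w < 5 then acc.2.2 + 1 else acc.2.2) else acc.2.2)

theorem pv_split₀_go_length (l : List Char) : ∀ cur acc,
    (PySem.Chars.split₀.go l cur acc).length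
      = acc.length + (if cur.isEmpty then 0 else 1) + pvWcAux l (!cur.isEmpty) := by
  induction l with
  | nil =>
    intro cur acc
    by_cases h : cur.isEmpty <;> simp [PySem.Chars.split₀.go, h, pvWcAux]
  | cons c r ih =>
    intro cur acc
    by_cases hs : PySem.Chars.isspace c
    · by_cases h : cur.isEmpty
      · simp [PySem.Chars.split₀.go, hs, h, pvWcAux, ih]
      · simp [PySem.Chars.split₀.go, hs, h, pvWcAux, ih]
    · have : (c :: cur).isEmpty = false := rfl
      by_cases h : cur.isEmpty <;>
        simp [PySem.Chars.split₀.go, hs, h, pvWcAux, ih, this] <;> try omega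
theorem pv_split₀_length (l : List Char) :
    (PySem.Chars.split₀ l).length = pvWcAux l false := by
  simpa using pv_split₀_go_length l [] []

theorem pv_modifyHead_nil_append (L : List (List Char)) :
    List.modifyHead (fun x : List Char => x) L = L := by
  cases L <;> simp
theorem pv_splitOn_go_eq (l : List Char) : ∀ (fuel : Nat) (cur : List Char)
    (acc : List (List Char)), l.length < fuel →
    PySem.Chars.splitOn.go ['\n'] fuel l cur acc
      = acc.reverse ++ List.modifyHead (fun x => cur.reverse ++ x)
          (List.splitOnP (fun c => c == '\n') l) := by
  induction l with
  | nil =>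
    intro fuel cur acc hf
    match fuel with
    | f + 1 => simp [PySem.Chars.splitOn.go, List.splitOnP_nil]
  | cons c r ih =>
    intro fuel cur acc hf
    match fuel with
    | f + 1 =>
      by_cases hc : c = '\n'
      · subst hc
        have hpre : List.isPrefixOf ['\n'] ('\n' :: r) = true := by
          simp [List.isPrefixOf]
        rw [show PySem.Chars.splitOn.go ['\n'] (f + 1) ('\n' :: r) cur acc
              = PySem.Chars.splitOn.go ['\n'] f (List.drop (List.length ['\n']) ('\n' :: r)) []
                  (cur.reverse :: acc) by simp [PySem.Chars.splitOn.go, hpre]]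
        simp only [List.length_cons, List.length_nil, List.drop_succ_cons, List.drop_zero]
        rw [ih f [] (cur.reverse :: acc) (by simpa using hf)]
        simp [List.splitOnP_cons, pv_modifyHead_nil_append]
      · have hpre : List.isPrefixOf ['\n'] (c :: r) = false := by
          simp [List.isPrefixOf]; exact fun h => hc h.symm
        rw [show PySem.Chars.splitOn.go ['\n'] (f + 1) (c :: r) cur acc
              = PySem.Chars.splitOn.go ['\n'] f r (c :: cur) acc by
            simp [PySem.Chars.splitOn.go, hpre]]
        rw [ih f (c :: cur) acc (by simpa using hf)]
        obtain ⟨h0, t0, hsp⟩ :=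
          List.exists_cons_of_ne_nil (List.splitOnP_ne_nil (fun c => c == '\n') r)
        simp [List.splitOnP_cons, hc, hsp, List.modifyHead]
theorem pv_splitOn_eq (l : List Char) :
    PySem.Chars.splitOn l ['\n'] = List.splitOnP (fun c => c == '\n') l := by
  have := pv_splitOn_go_eq l (l.length + 1) [] [] (by omega)
  simpa [PySem.Chars.splitOn, pv_modifyHead_nil_append] using this

theorem pv_wcAux_all_space (t : List Char) (h : ∀ c ∈ t, PySem.Chars.isspace c = true) :
    ∀ (b : Bool), pvWcAux t b = 0 := by
  induction t with
  | nil => intro b; rfl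
  | cons c r ih =>
    intro b
    have hc := h c (by simp)
    simp [pvWcAux, hc, ih (fun x hx => h x (by simp [hx]))]

theorem pv_wcAux_append_space (t : List Char) (h : ∀ c ∈ t, PySem.Chars.isspace c = true) :
    ∀ (l : List Char) (b : Bool), pvWcAux (l ++ t) b = pvWcAux l b := by
  intro l
  induction l with
  | nil => intro b; simp [pvWcAux, pv_wcAux_all_space t h]
  | cons c r ih =>
    intro b
    by_cases hc : PySem.Chars.isspace c <;> simp [pvWcAux, hc, ih]

theorem pv_wc_lstrip (l : List Char) : pvWc (PySem.Chars.lstrip l) = pvWc l := by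
  unfold pvWc
  induction l with
  | nil => rfl
  | cons c r ih =>
    by_cases hc : PySem.Chars.isspace c <;>
      simp [PySem.Chars.lstrip, List.dropWhile, hc, pvWcAux] <;>
      simpa [PySem.Chars.lstrip] using ih

theorem pv_wc_rstrip (s : List Char) : pvWc (PySem.Chars.rstrip s) = pvWc s := by
  have hdec : s = PySem.Chars.rstrip s
      ++ (List.takeWhile PySem.Chars.isspace s.reverse).reverse := by
    have h := congrArg List.reverse
      (List.takeWhile_append_dropWhile (p := PySem.Chars.isspace) (l := s.reverse))
    simp only [List.reverse_append, List.reverse_reverse] at h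
    rw [PySem.Chars.rstrip]
    exact h.symm
  have hsp : ∀ c ∈ (List.takeWhile PySem.Chars.isspace s.reverse).reverse,
      PySem.Chars.isspace c = true := by
    intro c hc
    exact List.mem_takeWhile_imp (by simpa using hc)
  conv_rhs => rw [hdec]
  unfold pvWc
  rw [pv_wcAux_append_space _ hsp]

theorem pv_wc_strip (l : List Char) : pvWc (PySem.Chars.strip l) = pvWc l := by
  unfold PySem.Chars.strip
  rw [pv_wc_rstrip, pv_wc_lstrip]

theorem pv_wc_zero_all_space (l : List Char) (h : pvWc l = 0) :
    ∀ c ∈ l, PySem.Chars.isspace c = true := by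
  induction l with
  | nil => simp
  | cons c r ih =>
    by_cases hc : PySem.Chars.isspace c
    · intro x hx
      rcases List.mem_cons.mp hx with rfl | hx'
      · exact hc
      · exact ih (by simpa [pvWc, pvWcAux, hc] using h) x hx'
    · exfalso
      simp [pvWc, pvWcAux, hc] at h

theorem pv_strip_nil_iff (l : List Char) : PySem.Chars.strip l = [] ↔ pvWc l = 0 := by
  constructor
  · intro h
    have := pv_wc_strip l
    rw [h] at this
    simpa [pvWc, pvWcAux] using this.symm
  · intro h
    have hall := pv_wc_zero_all_space l h
    have hl : PySem.Chars.lstrip l = [] :=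
      List.dropWhile_eq_nil_iff.mpr hall
    simp [PySem.Chars.strip, hl, PySem.Chars.rstrip]

theorem pv_wcl_sum (cs : List Char) : ∀ (lw : Nat) (inw : Bool),
    (pvWcl cs lw inw).sum = lw + pvWcAux cs inw := by
  induction cs with
  | nil => intro lw inw; simp [pvWcl, pvWcAux]
  | cons c r ih =>
    intro lw inw
    by_cases hc : c = '\n'
    · subst hc
      have hs : PySem.Chars.isspace '\n' = true := by decide
      simp [pvWcl, pvWcAux, hs, ih]
    · by_cases hs : PySem.Chars.isspace c
      · simp [pvWcl, hc, hs, pvWcAux, ih]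
      · cases inw <;> simp [pvWcl, hc, hs, pvWcAux, ih] <;> omega

theorem pv_wcl_eq (cs : List Char) : ∀ (lw : Nat) (inw : Bool),
    pvWcl cs lw inw
      = (lw + pvWcAux ((List.splitOnP (fun c => c == '\n') cs).headI) inw)
        :: ((List.splitOnP (fun c => c == '\n') cs).tail).map pvWc := by
  induction cs with
  | nil => intro lw inw; simp [pvWcl, List.splitOnP_nil, pvWcAux]
  | cons c r ih =>
    intro lw inw
    obtain ⟨h0, t0, hsp⟩ :=
      List.exists_cons_of_ne_nil (List.splitOnP_ne_nil (fun c => c == '\n') r)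
    by_cases hc : c = '\n'
    · subst hc
      rw [show pvWcl ('\n' :: r) lw inw = lw :: pvWcl r 0 false by simp [pvWcl]]
      rw [ih 0 false]
      simp [List.splitOnP_cons, hsp, pvWcAux, pvWc]
    · by_cases hs : PySem.Chars.isspace c
      · rw [show pvWcl (c :: r) lw inw = pvWcl r lw false by simp [pvWcl, hc, hs]]
        rw [ih lw false]
        simp [List.splitOnP_cons, hc, hsp, List.modifyHead, pvWcAux, hs]
      · rw [show pvWcl (c :: r) lw inw
              = pvWcl r (if inw then lw else lw + 1) true by simp [pvWcl, hc, hs]]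
        rw [ih _ true]
        cases inw <;>
          simp [List.splitOnP_cons, hc, hsp, List.modifyHead, pvWcAux, hs] <;> omega

theorem pv_scan_main (cs : List Char) : ∀ (t p s lw : Nat) (inw : Bool),
    pvFlush (cs.foldl pvScanStep (t, p, s, lw, inw))
      = (((pvWcl cs lw inw).foldl pvLineStep (t, p, s)).1,
         ((pvWcl cs lw inw).foldl pvLineStep (t, p, s)).2.1,
         ((pvWcl cs lw inw).foldl pvLineStep (t, p, s)).2.2, 0, false) := by
  induction cs with
  | nil => intro t p s lw inw; simp [pvWcl, pvFlush, pvLineStep]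
  | cons c r ih =>
    intro t p s lw inw
    by_cases hc : c = '\n'
    · subst hc
      rw [show (('\n' :: r).foldl pvScanStep (t, p, s, lw, inw))
            = r.foldl pvScanStep (pvFlush (t, p, s, lw, inw)) by
          simp [List.foldl_cons, pvScanStep]]
      rw [show pvWcl ('\n' :: r) lw inw = lw :: pvWcl r 0 false by simp [pvWcl]]
      simp only [List.foldl_cons]
      rw [show pvFlush (t, p, s, lw, inw)
            = (pvLineStep (t, p, s) lw |>.1, pvLineStep (t, p, s) lw |>.2.1,
               pvLineStep (t, p, s) lw |>.2.2, 0, false) by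
          simp [pvFlush, pvLineStep]]
      exact ih _ _ _ _ _
    · by_cases hs : PySem.Chars.isspace c
      · rw [show ((c :: r).foldl pvScanStep (t, p, s, lw, inw))
              = r.foldl pvScanStep (t, p, s, lw, false) by
            simp [List.foldl_cons, pvScanStep, hc, hs]]
        rw [show pvWcl (c :: r) lw inw = pvWcl r lw false by simp [pvWcl, hc, hs]]
        exact ih _ _ _ _ _
      · rw [show ((c :: r).foldl pvScanStep (t, p, s, lw, inw))
              = r.foldl pvScanStep (t, p, s, if inw then lw else lw + 1, true) by
            simp [List.foldl_cons, pvScanStep, hc, hs]]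
        rw [show pvWcl (c :: r) lw inw
              = pvWcl r (if inw then lw else lw + 1) true by simp [pvWcl, hc, hs]]
        exact ih _ _ _ _ _

theorem pv_linefold (ws : List Nat) : ∀ (t p s : Nat),
    ws.foldl pvLineStep (t, p, s)
      = (t + ws.sum, p + ws.countP (fun w => decide (0 < w)),
         s + ws.countP (fun w => decide (0 < w ∧ w < 5))) := by
  induction ws with
  | nil => intro t p s; simp
  | cons w r ih =>
    intro t p s
    simp only [List.foldl_cons, ih, pvLineStep, List.sum_cons, List.countP_cons]
    refine Prod.ext (by omega) (Prod.ext ?_ ?_) <;> simp <;> split_ifs <;> omega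

-- ===== VERDICT (by name: the statement is the Claim_ definition above) =====
theorem pv_countP_one (lines : List (List Char)) :
    (((lines.map PySem.Chars.strip).filter (fun p => !p.isEmpty)).length)
      = (lines.map pvWc).countP (fun w => decide (0 < w)) := by
  rw [← List.countP_eq_length_filter, List.countP_map, List.countP_map]
  refine List.countP_congr ?_
  intro l _
  simp only [Function.comp_apply, Bool.not_eq_true', List.isEmpty_eq_false_iff,
    decide_eq_true_eq]
  constructor
  · intro h
    have := (not_iff_not.mpr (pv_strip_nil_iff l)).mp h
    omega
  · intro h
    exact (not_iff_not.mpr (pv_strip_nil_iff l)).mpr (by omega)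

theorem pv_countP_short (lines : List (List Char)) :
    ((((lines.map PySem.Chars.strip).filter (fun p => !p.isEmpty)).filter
        (fun p => (PySem.Chars.split₀ p).length < 5)).length)
      = (lines.map pvWc).countP (fun w => decide (0 < w ∧ w < 5)) := by
  rw [← List.countP_eq_length_filter, List.countP_filter, List.countP_map, List.countP_map]
  refine List.countP_congr ?_
  intro l _
  simp only [Function.comp_apply, Bool.and_eq_true, decide_eq_true_eq, Bool.not_eq_true',
    List.isEmpty_eq_false_iff]
  rw [pv_split₀_length]
  have h2 : pvWcAux (PySem.Chars.strip l) false = pvWc l := pv_wc_strip l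
  rw [h2]
  constructor
  · rintro ⟨h5, hne⟩
    have := (not_iff_not.mpr (pv_strip_nil_iff l)).mp hne
    exact ⟨by omega, h5⟩
  · rintro ⟨h0, h5⟩
    exact ⟨h5, (not_iff_not.mpr (pv_strip_nil_iff l)).mpr (by omega)⟩

-- ===== VERDICT (by name: the statement is the Claim_ definition above) =====
theorem validate_content_py_spec : Claim_equal_validate_content_py := by
  intro content _
  unfold Spec_validate_content_py validate_content_py validate_content_py_alt
  by_cases hlen : content.toList.length < 100
  · rw [if_pos (Or.inr hlen), if_pos hlen]
  · have hne : ¬(content = "" ∨ content.toList.length < 100) := by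
      rintro (rfl | h)
      · exact hlen (by simp)
      · exact hlen h
    rw [if_neg hne, if_neg hlen]
    obtain ⟨h0, t0, hsp⟩ := List.exists_cons_of_ne_nil
      (List.splitOnP_ne_nil (fun c => c == '\n') content.toList)
    have hwcl : pvWcl content.toList 0 false
        = ((List.splitOnP (fun c => c == '\n') content.toList).map pvWc) := by
      rw [pv_wcl_eq, hsp]
      simp [pvWc]
    have hsum : ((List.splitOnP (fun c => c == '\n') content.toList).map pvWc).sum
        = pvWcAux content.toList false := by
      have := pv_wcl_sum content.toList 0 false
      rw [hwcl] at this
      simpa using this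
    simp only [pv_splitOn_eq]
    simp only [pv_countP_one, pv_countP_short]
    simp only [pv_scan_main, hwcl, pv_linefold, pv_split₀_length, hsum, Nat.zero_add]
    set W := pvWcAux content.toList false with hW
    set P := ((List.splitOnP (fun c => c == '\n') content.toList).map pvWc).countP
      (fun w => decide (0 < w)) with hP
    set S := ((List.splitOnP (fun c => c == '\n') content.toList).map pvWc).countP
      (fun w => decide (0 < w ∧ w < 5)) with hS
    by_cases h50 : W < 50
    · rw [if_pos h50]
      simp
      omega
    · rw [if_neg h50]
      by_cases h1 : P < 1
      · rw [if_pos h1]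
        simp
        omega
      · rw [if_neg h1]
        by_cases h2 : S * 2 > P
        · rw [if_pos h2]
          simp
          omega
        · rw [if_neg h2]
          simp
          omega
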